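-- pv_equiv track=rewrite | github.com/CynthiaWang2018/Text-Mining | PJ2-spell correction/1_Program/2_Different_Ngram.py | editType
-- ===== SOURCE A (Python) =====
-- def editType(candidate, word):
--     edit = [False] * 4
--     correct = ""
--     error = ""
--     x = ''
--     w = ''
--     for i in range(min([len(word), len(candidate)]) - 1):
--         if candidate[0:i + 1] != word[0:i + 1]:
--             if candidate[i:] == word[i - 1:]:
--                 edit[1] = True
--                 correct = candidate[i - 1]
--                 error = ''
--                 x = candidate[i - 2]
--                 w = candidate[i - 2] + candidate[i - 1]
--                 break
--             elif candidate[i:] == word[i + 1:]: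
--                 correct = ''
--                 error = word[i]
--                 if i == 0:
--                     w = '#'
--                     x = '#' + error
--                 else:
--                     w = word[i - 1]
--                     x = word[i - 1] + error
--                 edit[0] = True
--                 break
--             if candidate[i + 1:] == word[i + 1:]:
--                 edit[2] = True
--                 correct = candidate[i]
--                 error = word[i]
--                 x = error
--                 w = correct
--                 break
--             if candidate[i] == word[i + 1] and candidate[i + 2:] == word[i + 2:]:
--                 edit[3] = True
--                 correct = candidate[i] + candidate[i + 1]
--                 error = word[i] + word[i + 1]
--                 x = error
--                 w = correct
--                 break
--     candidate = candidate[::-1]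
--     word = word[::-1]
--     for i in range(min([len(word), len(candidate)]) - 1):
--         if candidate[0:i + 1] != word[0:i + 1]:
--             if candidate[i:] == word[i - 1:]:
--                 edit[1] = True
--                 correct = candidate[i - 1]
--                 error = ''
--                 x = candidate[i - 2]
--                 w = candidate[i - 2] + candidate[i - 1]
--                 break
--             elif candidate[i:] == word[i + 1:]:
--
--                 correct = ''
--                 error = word[i]
--                 if i == 0:
--                     w = '#'
--                     x = '#' + error
--                 else:
--                     w = word[i - 1]
--                     x = word[i - 1] + error
--                 edit[0] = True
--                 break
--             if candidate[i + 1:] == word[i + 1:]: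
--                 edit[2] = True
--                 correct = candidate[i]
--                 error = word[i]
--                 x = error
--                 w = correct
--                 break
--             if candidate[i] == word[i + 1] and candidate[i + 2:] == word[i + 2:]:
--                 edit[3] = True
--                 correct = candidate[i] + candidate[i + 1]
--                 error = word[i] + word[i + 1]
--                 x = error
--                 w = correct
--                 break
--     if word == candidate:
--         return "None", '', '', '', ''
--     if edit[1]:
--         return "Deletion", correct, error, x, w
--     elif edit[0]:
--         return "Insertion", correct, error, x, w
--     elif edit[2]:
--         return "Substitution", correct, error, x, w
--     elif edit[3]:
--         return "Reversal", correct, error, x, w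
-- ===== SOURCE B (Python) =====
-- # B: one O(n) pass per direction: the common prefix/suffix lengths determine the
-- # break index and branch in closed form, instead of A's quadratic slice-comparison loop.
--
-- def _pre(c, w):
--     """length of the longest common prefix"""
--     m = min(len(c), len(w))
--     p = 0
--     while p < m and c[p] == w[p]:
--         p += 1
--     return p
--
--
-- def _scan(c, w, st):
--     """one direction of the scan; st = (ins, dele, sub, rev, correct, error, x, w)"""
--     lc, lw = len(c), len(w)
--     m = min(lc, lw)
--     if m < 2:
--         return st
--     p = _pre(c, w)
--     s = _pre(c[::-1], w[::-1])
--     (ins, dele, sub, rev, _, _, _, _) = st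
--     if lw == lc - 1:
--         i = max(p, lc - s)
--         if i <= m - 2:
--             return (ins, True, sub, rev, c[i - 1], '', c[i - 2], c[i - 2] + c[i - 1])
--     elif lw == lc + 1:
--         i = max(p, lc - s)
--         if i <= m - 2:
--             e = w[i]
--             if i == 0:
--                 return (True, dele, sub, rev, '', e, '#' + e, '#')
--             return (True, dele, sub, rev, '', e, w[i - 1] + e, w[i - 1])
--     elif lw == lc and p + s < lc:
--         i_s = lc - 1 - s
--         if p < i_s and c[i_s - 1] == w[i_s]:
--             return (ins, dele, sub, True, c[i_s - 1] + c[i_s], w[i_s - 1] + w[i_s],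
--                     w[i_s - 1] + w[i_s], c[i_s - 1] + c[i_s])
--         if i_s <= m - 2:
--             return (ins, dele, True, rev, c[i_s], w[i_s], w[i_s], c[i_s])
--     return st
--
--
-- def editType(candidate, word):
--     st = (False, False, False, False, '', '', '', '')
--     st = _scan(candidate, word, st)
--     st = _scan(candidate[::-1], word[::-1], st)
--     (ins, dele, sub, rev, correct, error, x, w) = st
--     if candidate == word:
--         return "None", '', '', '', ''
--     if dele:
--         return "Deletion", correct, error, x, w
--     if ins:
--         return "Insertion", correct, error, x, w
--     if sub:
--         return "Substitution", correct, error, x, w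
--     if rev:
--         return "Reversal", correct, error, x, w
-- ===== Notes on version B (the rewrite author's own statement) =====
-- stated objective: faster
-- what changed: Replaces A's quadratic loops that re-compare growing prefix slices and whole suffix slices at every index with one linear common-prefix scan and one linear common-suffix scan per direction, from which the break index and the edit branch are selected in closed form.
import Mathlib
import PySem

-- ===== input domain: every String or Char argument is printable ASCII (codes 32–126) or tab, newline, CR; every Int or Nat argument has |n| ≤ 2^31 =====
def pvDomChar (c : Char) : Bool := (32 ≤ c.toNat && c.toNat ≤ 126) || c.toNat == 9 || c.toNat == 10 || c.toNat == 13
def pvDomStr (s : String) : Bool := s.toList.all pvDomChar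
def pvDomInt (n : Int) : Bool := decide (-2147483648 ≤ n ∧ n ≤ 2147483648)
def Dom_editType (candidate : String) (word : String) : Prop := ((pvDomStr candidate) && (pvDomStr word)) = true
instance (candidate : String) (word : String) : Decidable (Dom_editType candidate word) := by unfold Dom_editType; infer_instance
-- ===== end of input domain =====

-- B is a genuinely different algorithm (two linear prefix scans + closed-form branch
-- selection per direction) proved to return exactly A's value; A is total on strings.

-- shared state record: the four edit flags and the four context strings (as char lists)
structure EtSt where
  ins : Bool
  del : Bool
  sub : Bool
  rev : Bool
  co : List Char
  er : List Char
  xx : List Char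
  ww : List Char
deriving DecidableEq, Repr

-- Python s[j] (possibly negative index, always in range where the ports use it)
def gD (xs : List Char) (j : Int) : Char := PySem.List.pyGetD xs j ' '

-- ===== PORT A =====
-- one iteration list = range(min-1); break is modelled by returning without recursing
def loopA (c w : List Char) : List Nat → EtSt → EtSt
  | [], st => st
  | i :: rest, st =>
    if PySem.List.slice c (some 0) (some ((i : Int) + 1)) ≠
       PySem.List.slice w (some 0) (some ((i : Int) + 1)) then
      if PySem.List.slice c (some (i : Int)) none = PySem.List.slice w (some ((i : Int) - 1)) none then
        { st with del := true, co := [gD c ((i : Int) - 1)], er := [],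
                  xx := [gD c ((i : Int) - 2)], ww := [gD c ((i : Int) - 2), gD c ((i : Int) - 1)] }
      else if PySem.List.slice c (some (i : Int)) none = PySem.List.slice w (some ((i : Int) + 1)) none then
        if i = 0 then
          { st with ins := true, co := [], er := [gD w (i : Int)],
                    xx := ['#', gD w (i : Int)], ww := ['#'] }
        else
          { st with ins := true, co := [], er := [gD w (i : Int)],
                    xx := [gD w ((i : Int) - 1), gD w (i : Int)], ww := [gD w ((i : Int) - 1)] }
      else if PySem.List.slice c (some ((i : Int) + 1)) none = PySem.List.slice w (some ((i : Int) + 1)) none then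
        { st with sub := true, co := [gD c (i : Int)], er := [gD w (i : Int)],
                  xx := [gD w (i : Int)], ww := [gD c (i : Int)] }
      else if gD c (i : Int) = gD w ((i : Int) + 1) ∧
              PySem.List.slice c (some ((i : Int) + 2)) none = PySem.List.slice w (some ((i : Int) + 2)) none then
        { st with rev := true, co := [gD c (i : Int), gD c ((i : Int) + 1)],
                  er := [gD w (i : Int), gD w ((i : Int) + 1)],
                  xx := [gD w (i : Int), gD w ((i : Int) + 1)],
                  ww := [gD c (i : Int), gD c ((i : Int) + 1)] }
      else loopA c w rest st
    else loopA c w rest st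

def etFinal (cEq : Bool) (st : EtSt) : Option (List String) :=
  if cEq then some ["None", "", "", "", ""]
  else if st.del then some ["Deletion", String.ofList st.co, String.ofList st.er, String.ofList st.xx, String.ofList st.ww]
  else if st.ins then some ["Insertion", String.ofList st.co, String.ofList st.er, String.ofList st.xx, String.ofList st.ww]
  else if st.sub then some ["Substitution", String.ofList st.co, String.ofList st.er, String.ofList st.xx, String.ofList st.ww]
  else if st.rev then some ["Reversal", String.ofList st.co, String.ofList st.er, String.ofList st.xx, String.ofList st.ww]
  else none

def editType (candidate : String) (word : String) : Option (List String) :=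
  let c := candidate.toList
  let w := word.toList
  let st1 := loopA c w (List.range (min w.length c.length - 1)) ⟨false, false, false, false, [], [], [], []⟩
  let c2 := c.reverse
  let w2 := w.reverse
  let st2 := loopA c2 w2 (List.range (min w2.length c2.length - 1)) st1
  etFinal (w2 = c2 : Bool) st2

-- ===== PORT B =====
-- longest-common-prefix length (the while loop of Source B's _pre)
def cpl : List Char → List Char → Nat
  | a :: as, b :: bs => if a = b then cpl as bs + 1 else 0
  | _, _ => 0

def scanB (c w : List Char) (st : EtSt) : EtSt :=
  let lc := c.length
  let lw := w.length
  let m := min lc lw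
  if m < 2 then st
  else
    let p := cpl c w
    let s := cpl c.reverse w.reverse
    if (lw : Int) = (lc : Int) - 1 then
      let i := max p (lc - s)
      if i ≤ m - 2 then
        { st with del := true, co := [gD c ((i : Int) - 1)], er := [],
                  xx := [gD c ((i : Int) - 2)], ww := [gD c ((i : Int) - 2), gD c ((i : Int) - 1)] }
      else st
    else if (lw : Int) = (lc : Int) + 1 then
      let i := max p (lc - s)
      if i ≤ m - 2 then
        if i = 0 then
          { st with ins := true, co := [], er := [gD w (i : Int)],
                    xx := ['#', gD w (i : Int)], ww := ['#'] }
        else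
          { st with ins := true, co := [], er := [gD w (i : Int)],
                    xx := [gD w ((i : Int) - 1), gD w (i : Int)], ww := [gD w ((i : Int) - 1)] }
      else st
    else if lw = lc ∧ p + s < lc then
      let is := lc - 1 - s
      if p < is ∧ gD c ((is : Int) - 1) = gD w (is : Int) then
        { st with rev := true, co := [gD c ((is : Int) - 1), gD c (is : Int)],
                  er := [gD w ((is : Int) - 1), gD w (is : Int)],
                  xx := [gD w ((is : Int) - 1), gD w (is : Int)],
                  ww := [gD c ((is : Int) - 1), gD c (is : Int)] }
      else if is ≤ m - 2 then
        { st with sub := true, co := [gD c (is : Int)], er := [gD w (is : Int)],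
                  xx := [gD w (is : Int)], ww := [gD c (is : Int)] }
      else st
    else st

def editType_alt (candidate : String) (word : String) : Option (List String) :=
  let c := candidate.toList
  let w := word.toList
  let st1 := scanB c w ⟨false, false, false, false, [], [], [], []⟩
  let st2 := scanB c.reverse w.reverse st1
  etFinal (c = w : Bool) st2

-- ===== PRECONDITION & SPEC =====
def Spec_editType (candidate : String) (word : String) (out : Option (List String)) : Prop := out = editType_alt candidate word
instance (candidate : String) (word : String) (out : Option (List String)) : Decidable (Spec_editType candidate word out) := by unfold Spec_editType; infer_instance

-- ===== CLAIM (what is proved, stated in full; the proofs are below) =====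
def Claim_equal_editType : Prop := ∀ (candidate : String) (word : String), Dom_editType candidate word → Spec_editType candidate word (editType candidate word)

-- ===== LEMMAS AND PROOFS =====

theorem cpl_le_left : ∀ (c w : List Char), cpl c w ≤ c.length := by
  intro c
  induction c with
  | nil => intro w; cases w <;> simp [cpl]
  | cons a as ih =>
    intro w
    cases w with
    | nil => simp [cpl]
    | cons b bs =>
      by_cases h : a = b <;> simp [cpl, h]
      exact ih bs

theorem cpl_le_right : ∀ (c w : List Char), cpl c w ≤ w.length := by
  intro c
  induction c with
  | nil => intro w; cases w <;> simp [cpl]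
  | cons a as ih =>
    intro w
    cases w with
    | nil => simp [cpl]
    | cons b bs =>
      by_cases h : a = b <;> simp [cpl, h]
      exact ih bs

theorem take_cpl : ∀ (c w : List Char), c.take (cpl c w) = w.take (cpl c w) := by
  intro c
  induction c with
  | nil => intro w; cases w <;> simp [cpl]
  | cons a as ih =>
    intro w
    cases w with
    | nil => simp [cpl]
    | cons b bs =>
      by_cases h : a = b <;> simp [cpl, h]
      exact ih bs

theorem cpl_get_ne : ∀ (c w : List Char) (hc : cpl c w < c.length) (hw : cpl c w < w.length),
    c.get ⟨cpl c w, hc⟩ ≠ w.get ⟨cpl c w, hw⟩ := by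
  intro c
  induction c with
  | nil => intro w hc; simp at hc
  | cons a as ih =>
    intro w hc hw
    cases w with
    | nil => simp at hw
    | cons b bs =>
      by_cases h : a = b
      · have e : cpl (a :: as) (b :: bs) = cpl as bs + 1 := by simp [cpl, h]
        have hc' : cpl as bs < as.length := by simp [e] at hc; omega
        have hw' : cpl as bs < bs.length := by simp [e] at hw; omega
        have := ih bs hc' hw'
        intro hcontra
        apply this
        have e1 : (a :: as).get ⟨cpl (a :: as) (b :: bs), hc⟩ = as.get ⟨cpl as bs, hc'⟩ := by
          simp only [List.get_eq_getElem]
          simp only [e, List.getElem_cons_succ]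
        have e2 : (b :: bs).get ⟨cpl (a :: as) (b :: bs), hw⟩ = bs.get ⟨cpl as bs, hw'⟩ := by
          simp only [List.get_eq_getElem]
          simp only [e, List.getElem_cons_succ]
        rw [e1, e2] at hcontra
        exact hcontra
      · have e : cpl (a :: as) (b :: bs) = 0 := by simp [cpl, h]
        intro hcontra
        apply h
        have e1 : (a :: as).get ⟨cpl (a :: as) (b :: bs), hc⟩ = a := by
          simp only [List.get_eq_getElem]
          simp only [e, List.getElem_cons_zero]
        have e2 : (b :: bs).get ⟨cpl (a :: as) (b :: bs), hw⟩ = b := by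
          simp only [List.get_eq_getElem]
          simp only [e, List.getElem_cons_zero]
        rw [e1, e2] at hcontra
        exact hcontra

theorem take_eq_of_le_cpl (c w : List Char) (k : Nat) (h : k ≤ cpl c w) :
    c.take k = w.take k := by
  have h1 := take_cpl c w
  calc c.take k = (c.take (cpl c w)).take k := by rw [List.take_take, Nat.min_eq_left h]
    _ = (w.take (cpl c w)).take k := by rw [h1]
    _ = w.take k := by rw [List.take_take, Nat.min_eq_left h]

theorem take_ne_of_cpl_lt (c w : List Char) (k : Nat) (hk1 : k ≤ c.length) (hk2 : k ≤ w.length)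
    (h : cpl c w < k) : c.take k ≠ w.take k := by
  intro he
  have hc : cpl c w < c.length := lt_of_lt_of_le h hk1
  have hw : cpl c w < w.length := lt_of_lt_of_le h hk2
  apply cpl_get_ne c w hc hw
  have h1 := congrArg (fun l => l[cpl c w]?) he
  simp only [List.getElem?_take, h, if_pos] at h1
  rw [List.getElem?_eq_getElem hc, List.getElem?_eq_getElem hw] at h1
  simpa using h1

theorem take_eq_iff_cpl (c w : List Char) (k : Nat) (hk1 : k ≤ c.length) (hk2 : k ≤ w.length) :
    c.take k = w.take k ↔ k ≤ cpl c w := by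
  constructor
  · intro h; by_contra hlt; exact take_ne_of_cpl_lt c w k hk1 hk2 (by omega) h
  · exact take_eq_of_le_cpl c w k

theorem drop_eq_iff_cpl (c w : List Char) (i j : Nat) :
    c.drop i = w.drop j ↔
      (c.length - i = w.length - j ∧ c.length - i ≤ cpl c.reverse w.reverse) := by
  constructor
  · intro h
    have hlen : c.length - i = w.length - j := by
      have := congrArg List.length h; simpa using this
    refine ⟨hlen, ?_⟩
    have hrev : (c.drop i).reverse = (w.drop j).reverse := by rw [h]
    rw [List.reverse_drop, List.reverse_drop] at hrev
    have := (take_eq_iff_cpl c.reverse w.reverse (c.length - i) (by simp) (by simp; omega)).1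
      (by rw [hlen] at hrev ⊢; simpa using hrev)
    exact this
  · rintro ⟨hlen, hle⟩
    have h1 : c.reverse.take (c.length - i) = w.reverse.take (c.length - i) :=
      take_eq_of_le_cpl _ _ _ hle
    have h2 : (c.drop i).reverse = (w.drop j).reverse := by
      rw [List.reverse_drop, List.reverse_drop, ← hlen, h1]
    simpa using h2

theorem eq_of_cpl_overlap (c w : List Char) (hl : w.length = c.length)
    (h : c.length ≤ cpl c w + cpl c.reverse w.reverse) : c = w := by
  have h1 : c.take (cpl c w) = w.take (cpl c w) := take_eq_of_le_cpl _ _ _ le_rfl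
  have h2 : c.drop (cpl c w) = w.drop (cpl c w) := by
    rw [drop_eq_iff_cpl]
    constructor
    · omega
    · have := cpl_le_left c w; omega
  calc c = c.take (cpl c w) ++ c.drop (cpl c w) := (List.take_append_drop _ _).symm
    _ = w.take (cpl c w) ++ w.drop (cpl c w) := by rw [h1, h2]
    _ = w := List.take_append_drop _ _

-- the four branch conditions of A's loop body, and the no-op / break shapes of one iteration
def MisP (c w : List Char) (i : Nat) : Prop :=
  PySem.List.slice c (some 0) (some ((i : Int) + 1)) = PySem.List.slice w (some 0) (some ((i : Int) + 1))
def C1P (c w : List Char) (i : Nat) : Prop :=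
  PySem.List.slice c (some (i : Int)) none = PySem.List.slice w (some ((i : Int) - 1)) none
def C2P (c w : List Char) (i : Nat) : Prop :=
  PySem.List.slice c (some (i : Int)) none = PySem.List.slice w (some ((i : Int) + 1)) none
def C3P (c w : List Char) (i : Nat) : Prop :=
  PySem.List.slice c (some ((i : Int) + 1)) none = PySem.List.slice w (some ((i : Int) + 1)) none
def C4P (c w : List Char) (i : Nat) : Prop :=
  gD c (i : Int) = gD w ((i : Int) + 1) ∧
    PySem.List.slice c (some ((i : Int) + 2)) none = PySem.List.slice w (some ((i : Int) + 2)) none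

def SkipP (c w : List Char) (i : Nat) : Prop :=
  MisP c w i ∨ (¬ C1P c w i ∧ ¬ C2P c w i ∧ ¬ C3P c w i ∧ ¬ C4P c w i)
def FireP (c w : List Char) (i : Nat) : Prop :=
  ¬ MisP c w i ∧ (C1P c w i ∨ C2P c w i ∨ C3P c w i ∨ C4P c w i)

theorem loopA_cons_skip (c w : List Char) (i : Nat) (rest : List Nat) (st : EtSt)
    (h : SkipP c w i) : loopA c w (i :: rest) st = loopA c w rest st := by
  unfold SkipP MisP C1P C2P C3P C4P at h
  simp only [loopA]
  rcases h with h | ⟨h1, h2, h3, h4⟩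
  · rw [if_neg (not_not_intro h)]
  · by_cases hm : PySem.List.slice c (some 0) (some ((i : Int) + 1)) =
        PySem.List.slice w (some 0) (some ((i : Int) + 1))
    · rw [if_neg (not_not_intro hm)]
    · rw [if_pos hm, if_neg h1, if_neg h2, if_neg h3, if_neg h4]

theorem loopA_cons_fire (c w : List Char) (i : Nat) (rest : List Nat) (st : EtSt)
    (h : FireP c w i) : loopA c w (i :: rest) st = loopA c w [i] st := by
  unfold FireP MisP C1P C2P C3P C4P at h
  obtain ⟨hm, hc⟩ := h
  simp only [loopA]
  rw [if_pos hm, if_pos hm]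
  by_cases h1 : PySem.List.slice c (some (i : Int)) none = PySem.List.slice w (some ((i : Int) - 1)) none
  · rw [if_pos h1, if_pos h1]
  · rw [if_neg h1, if_neg h1]
    by_cases h2 : PySem.List.slice c (some (i : Int)) none = PySem.List.slice w (some ((i : Int) + 1)) none
    · rw [if_pos h2, if_pos h2]
    · rw [if_neg h2, if_neg h2]
      by_cases h3 : PySem.List.slice c (some ((i : Int) + 1)) none = PySem.List.slice w (some ((i : Int) + 1)) none
      · rw [if_pos h3, if_pos h3]
      · rw [if_neg h3, if_neg h3]
        have h4 : gD c (i : Int) = gD w ((i : Int) + 1) ∧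
            PySem.List.slice c (some ((i : Int) + 2)) none = PySem.List.slice w (some ((i : Int) + 2)) none := by
          tauto
        rw [if_pos h4, if_pos h4]

theorem loopA_range'_skip (c w : List Char) :
    ∀ (k a : Nat) (st : EtSt), (∀ i, a ≤ i → i < a + k → SkipP c w i) →
      loopA c w (List.range' a k) st = st := by
  intro k
  induction k with
  | zero => intro a st _; rfl
  | succ n ih =>
    intro a st h
    rw [List.range'_succ, loopA_cons_skip c w a _ st (h a le_rfl (by omega))]
    exact ih (a + 1) st (fun i u v => h i (by omega) (by omega))

theorem loopA_range'_fire (c w : List Char) :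
    ∀ (k a i0 : Nat) (st : EtSt), a ≤ i0 → i0 < a + k →
      (∀ i, a ≤ i → i < i0 → SkipP c w i) → FireP c w i0 →
      loopA c w (List.range' a k) st = loopA c w [i0] st := by
  intro k
  induction k with
  | zero => intro a i0 st h1 h2 _ _; omega
  | succ n ih =>
    intro a i0 st h1 h2 hskip hfire
    rw [List.range'_succ]
    by_cases he : a = i0
    · subst he; exact loopA_cons_fire c w a _ st hfire
    · rw [loopA_cons_skip c w a _ st (hskip a le_rfl (by omega))]
      exact ih (a + 1) i0 st (by omega) (by omega) (fun i u v => hskip i (by omega) v) hfire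

-- arithmetic characterisations of the conditions
theorem MisP_iff (c w : List Char) (i : Nat) :
    MisP c w i ↔ c.take (i + 1) = w.take (i + 1) := by
  unfold MisP
  have e : ((i : Int) + 1) = (((i + 1 : Nat)) : Int) := by push_cast; ring
  rw [e, PySem.List.slice_zero_start, PySem.List.slice_zero_start,
    PySem.List.slice_to_natCast, PySem.List.slice_to_natCast]

theorem C1P_iff (c w : List Char) (i : Nat) (h : 1 ≤ i) :
    C1P c w i ↔ (c.length - i = w.length - (i - 1) ∧
      c.length - i ≤ cpl c.reverse w.reverse) := by
  unfold C1P
  have e : ((i : Int) - 1) = (((i - 1 : Nat)) : Int) := by omega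
  rw [e, PySem.List.slice_from_natCast, PySem.List.slice_from_natCast, drop_eq_iff_cpl]

theorem C1P_zero_iff (c w : List Char) :
    C1P c w 0 ↔ (c.length - 0 = w.length - (w.length - 1) ∧
      c.length - 0 ≤ cpl c.reverse w.reverse) := by
  unfold C1P
  have e : (((0 : Nat) : Int) - 1) = (-1 : Int) := by norm_num
  rw [e, PySem.List.slice_from_natCast, PySem.List.slice_from_neg_one, drop_eq_iff_cpl]

theorem C2P_iff (c w : List Char) (i : Nat) :
    C2P c w i ↔ (c.length - i = w.length - (i + 1) ∧
      c.length - i ≤ cpl c.reverse w.reverse) := by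
  unfold C2P
  have e : ((i : Int) + 1) = (((i + 1 : Nat)) : Int) := by push_cast; ring
  rw [e, PySem.List.slice_from_natCast, PySem.List.slice_from_natCast, drop_eq_iff_cpl]

theorem C3P_iff (c w : List Char) (i : Nat) :
    C3P c w i ↔ (c.length - (i + 1) = w.length - (i + 1) ∧
      c.length - (i + 1) ≤ cpl c.reverse w.reverse) := by
  unfold C3P
  have e : ((i : Int) + 1) = (((i + 1 : Nat)) : Int) := by push_cast; ring
  rw [e, PySem.List.slice_from_natCast, PySem.List.slice_from_natCast, drop_eq_iff_cpl]

theorem C4P_slice_iff (c w : List Char) (i : Nat) :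
    (PySem.List.slice c (some ((i : Int) + 2)) none = PySem.List.slice w (some ((i : Int) + 2)) none) ↔
      (c.length - (i + 2) = w.length - (i + 2) ∧
        c.length - (i + 2) ≤ cpl c.reverse w.reverse) := by
  have e : ((i : Int) + 2) = (((i + 2 : Nat)) : Int) := by push_cast; ring
  rw [e, PySem.List.slice_from_natCast, PySem.List.slice_from_natCast, drop_eq_iff_cpl]

theorem loop_eq_scan_proof (c w : List Char) (st : EtSt) :
    loopA c w (List.range (min w.length c.length - 1)) st = scanB c w st := by
  rw [List.range_eq_range', Nat.min_comm]
  have hple1 : cpl c w ≤ c.length := cpl_le_left c w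
  have hple2 : cpl c w ≤ w.length := cpl_le_right c w
  have hsle1 : cpl c.reverse w.reverse ≤ c.length := by
    simpa using cpl_le_left c.reverse w.reverse
  have hsle2 : cpl c.reverse w.reverse ≤ w.length := by
    simpa using cpl_le_right c.reverse w.reverse
  by_cases hm2 : min c.length w.length < 2
  · have h0 : min c.length w.length - 1 = 0 := by omega
    rw [h0]
    show loopA c w [] st = scanB c w st
    simp only [loopA, scanB]
    rw [if_pos hm2]
  · push Not at hm2
    by_cases hdel : w.length + 1 = c.length
    · -- deletion shape: only branch 1 can fire, at index max p (lc - s)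
      have hskip : ∀ i, i < min c.length w.length - 1 →
          i < max (cpl c w) (c.length - cpl c.reverse w.reverse) → SkipP c w i := by
        intro i hi1 hi2
        by_cases hp : i + 1 ≤ cpl c w
        · exact Or.inl ((MisP_iff c w i).2 (take_eq_of_le_cpl c w (i + 1) hp))
        · right
          have hi3 : i < c.length - cpl c.reverse w.reverse := by omega
          refine ⟨?_, ?_, ?_, ?_⟩
          · rcases Nat.eq_zero_or_pos i with h0 | h1
            · subst h0; rw [C1P_zero_iff]; omega
            · rw [C1P_iff c w i h1]; omega
          · rw [C2P_iff]; omega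
          · rw [C3P_iff]; omega
          · rintro ⟨-, h4⟩; rw [C4P_slice_iff] at h4; omega
      by_cases hfi : max (cpl c w) (c.length - cpl c.reverse w.reverse) ≤ min c.length w.length - 2
      · have hi01 : 1 ≤ max (cpl c w) (c.length - cpl c.reverse w.reverse) := by omega
        have hnm : ¬ MisP c w (max (cpl c w) (c.length - cpl c.reverse w.reverse)) := by
          rw [MisP_iff]
          exact take_ne_of_cpl_lt c w _ (by omega) (by omega) (by omega)
        have hc1 : C1P c w (max (cpl c w) (c.length - cpl c.reverse w.reverse)) := by
          rw [C1P_iff c w _ hi01]; omega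
        rw [loopA_range'_fire c w (min c.length w.length - 1) 0
            (max (cpl c w) (c.length - cpl c.reverse w.reverse)) st (by omega) (by omega)
            (fun i _ v => hskip i (by omega) v) ⟨hnm, Or.inl hc1⟩]
        unfold MisP at hnm
        unfold C1P at hc1
        simp only [loopA]
        rw [if_pos hnm, if_pos hc1]
        simp only [scanB]
        rw [if_neg (by omega : ¬ min c.length w.length < 2),
          if_pos (by omega : ((w.length : Int) = (c.length : Int) - 1)),
          if_pos hfi]
      · rw [loopA_range'_skip c w (min c.length w.length - 1) 0 st
            (fun i _ v => hskip i (by omega) (by omega))]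
        simp only [scanB]
        rw [if_neg (by omega : ¬ min c.length w.length < 2),
          if_pos (by omega : ((w.length : Int) = (c.length : Int) - 1)),
          if_neg hfi]
    · by_cases hins : w.length = c.length + 1
      · -- insertion shape: only branch 2 can fire, at index max p (lc - s)
        have hskip : ∀ i, i < min c.length w.length - 1 →
            i < max (cpl c w) (c.length - cpl c.reverse w.reverse) → SkipP c w i := by
          intro i hi1 hi2
          by_cases hp : i + 1 ≤ cpl c w
          · exact Or.inl ((MisP_iff c w i).2 (take_eq_of_le_cpl c w (i + 1) hp))
          · right
            have hi3 : i < c.length - cpl c.reverse w.reverse := by omega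
            refine ⟨?_, ?_, ?_, ?_⟩
            · rcases Nat.eq_zero_or_pos i with h0 | h1
              · subst h0; rw [C1P_zero_iff]; omega
              · rw [C1P_iff c w i h1]; omega
            · rw [C2P_iff]; omega
            · rw [C3P_iff]; omega
            · rintro ⟨-, h4⟩; rw [C4P_slice_iff] at h4; omega
        by_cases hfi : max (cpl c w) (c.length - cpl c.reverse w.reverse) ≤ min c.length w.length - 2
        · have hnm : ¬ MisP c w (max (cpl c w) (c.length - cpl c.reverse w.reverse)) := by
            rw [MisP_iff]
            exact take_ne_of_cpl_lt c w _ (by omega) (by omega) (by omega)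
          have hc1 : ¬ C1P c w (max (cpl c w) (c.length - cpl c.reverse w.reverse)) := by
            rcases Nat.eq_zero_or_pos (max (cpl c w) (c.length - cpl c.reverse w.reverse)) with h0 | h1
            · rw [h0, C1P_zero_iff]; omega
            · rw [C1P_iff c w _ h1]; omega
          have hc2 : C2P c w (max (cpl c w) (c.length - cpl c.reverse w.reverse)) := by
            rw [C2P_iff]; omega
          rw [loopA_range'_fire c w (min c.length w.length - 1) 0
              (max (cpl c w) (c.length - cpl c.reverse w.reverse)) st (by omega) (by omega)
              (fun i _ v => hskip i (by omega) v) ⟨hnm, Or.inr (Or.inl hc2)⟩]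
          unfold MisP at hnm
          unfold C1P at hc1
          unfold C2P at hc2
          simp only [loopA]
          rw [if_pos hnm, if_neg hc1, if_pos hc2]
          simp only [scanB]
          rw [if_neg (by omega : ¬ min c.length w.length < 2),
            if_neg (by omega : ¬ ((w.length : Int) = (c.length : Int) - 1)),
            if_pos (by omega : ((w.length : Int) = (c.length : Int) + 1)),
            if_pos hfi]
        · rw [loopA_range'_skip c w (min c.length w.length - 1) 0 st
              (fun i _ v => hskip i (by omega) (by omega))]
          simp only [scanB]
          rw [if_neg (by omega : ¬ min c.length w.length < 2),
            if_neg (by omega : ¬ ((w.length : Int) = (c.length : Int) - 1)),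
            if_pos (by omega : ((w.length : Int) = (c.length : Int) + 1)),
            if_neg hfi]
      · by_cases heqc : w.length = c.length
        · by_cases hov : c.length ≤ cpl c w + cpl c.reverse w.reverse
          · -- the two strings are equal: the loop never sees a mismatch
            have hcw : c = w := eq_of_cpl_overlap c w heqc hov
            rw [loopA_range'_skip c w (min c.length w.length - 1) 0 st
                (fun i _ _ => Or.inl ((MisP_iff c w i).2 (by rw [hcw])))]
            simp only [scanB]
            rw [if_neg (by omega : ¬ min c.length w.length < 2),
              if_neg (by omega : ¬ ((w.length : Int) = (c.length : Int) - 1)),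
              if_neg (by omega : ¬ ((w.length : Int) = (c.length : Int) + 1)),
              if_neg (by omega : ¬ (w.length = c.length ∧ cpl c w + cpl c.reverse w.reverse < c.length))]
          · -- equal lengths, a real mismatch: branch 3 or 4 fires
            push Not at hov
            have hpis : cpl c w ≤ c.length - 1 - cpl c.reverse w.reverse := by omega
            by_cases hrev : cpl c w < c.length - 1 - cpl c.reverse w.reverse ∧
                gD c (((c.length - 1 - cpl c.reverse w.reverse : Nat) : Int) - 1) =
                  gD w ((c.length - 1 - cpl c.reverse w.reverse : Nat) : Int)
            · -- reversal fires at i0 = is - 1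
              obtain ⟨hrlt, hrch⟩ := hrev
              have e1 : ((c.length - 1 - cpl c.reverse w.reverse - 1 : Nat) : Int) =
                  ((c.length - 1 - cpl c.reverse w.reverse : Nat) : Int) - 1 := by omega
              have e2 : ((c.length - 1 - cpl c.reverse w.reverse - 1 : Nat) : Int) + 1 =
                  ((c.length - 1 - cpl c.reverse w.reverse : Nat) : Int) := by omega
              have hskip : ∀ i, i < c.length - 1 - cpl c.reverse w.reverse - 1 → SkipP c w i := by
                intro i hi2
                by_cases hp : i + 1 ≤ cpl c w
                · exact Or.inl ((MisP_iff c w i).2 (take_eq_of_le_cpl c w (i + 1) hp))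
                · right
                  refine ⟨?_, ?_, ?_, ?_⟩
                  · rcases Nat.eq_zero_or_pos i with h0 | h1
                    · subst h0; rw [C1P_zero_iff]; omega
                    · rw [C1P_iff c w i h1]; omega
                  · rw [C2P_iff]; omega
                  · rw [C3P_iff]; omega
                  · rintro ⟨-, h4⟩; rw [C4P_slice_iff] at h4; omega
              have hnm : ¬ MisP c w (c.length - 1 - cpl c.reverse w.reverse - 1) := by
                rw [MisP_iff]
                exact take_ne_of_cpl_lt c w _ (by omega) (by omega) (by omega)
              have hc1 : ¬ C1P c w (c.length - 1 - cpl c.reverse w.reverse - 1) := by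
                rcases Nat.eq_zero_or_pos (c.length - 1 - cpl c.reverse w.reverse - 1) with h0 | h1
                · rw [h0, C1P_zero_iff]; omega
                · rw [C1P_iff c w _ h1]; omega
              have hc2 : ¬ C2P c w (c.length - 1 - cpl c.reverse w.reverse - 1) := by
                rw [C2P_iff]; omega
              have hc3 : ¬ C3P c w (c.length - 1 - cpl c.reverse w.reverse - 1) := by
                rw [C3P_iff]; omega
              have hc4 : C4P c w (c.length - 1 - cpl c.reverse w.reverse - 1) := by
                refine ⟨?_, ?_⟩
                · rw [e2, e1]; exact hrch
                · rw [C4P_slice_iff]; omega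
              rw [loopA_range'_fire c w (min c.length w.length - 1) 0
                  (c.length - 1 - cpl c.reverse w.reverse - 1) st (by omega) (by omega)
                  (fun i _ v => hskip i v) ⟨hnm, Or.inr (Or.inr (Or.inr hc4))⟩]
              unfold MisP at hnm
              unfold C1P at hc1
              unfold C2P at hc2
              unfold C3P at hc3
              unfold C4P at hc4
              simp only [loopA]
              rw [if_pos hnm, if_neg hc1, if_neg hc2, if_neg hc3, if_pos hc4]
              simp only [scanB]
              rw [if_neg (by omega : ¬ min c.length w.length < 2),
                if_neg (by omega : ¬ ((w.length : Int) = (c.length : Int) - 1)),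
                if_neg (by omega : ¬ ((w.length : Int) = (c.length : Int) + 1)),
                if_pos (⟨heqc, by omega⟩ :
                  w.length = c.length ∧ cpl c w + cpl c.reverse w.reverse < c.length),
                if_pos (⟨hrlt, hrch⟩ : cpl c w < c.length - 1 - cpl c.reverse w.reverse ∧
                  gD c (((c.length - 1 - cpl c.reverse w.reverse : Nat) : Int) - 1) =
                    gD w ((c.length - 1 - cpl c.reverse w.reverse : Nat) : Int))]
              rw [e2, e1]
            · -- no reversal: substitution fires at is, if is is inside the range
              have hskip : ∀ i, i < min c.length w.length - 1 →
                  i < c.length - 1 - cpl c.reverse w.reverse → SkipP c w i := by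
                intro i hi1 hi2
                by_cases hp : i + 1 ≤ cpl c w
                · exact Or.inl ((MisP_iff c w i).2 (take_eq_of_le_cpl c w (i + 1) hp))
                · right
                  refine ⟨?_, ?_, ?_, ?_⟩
                  · rcases Nat.eq_zero_or_pos i with h0 | h1
                    · subst h0; rw [C1P_zero_iff]; omega
                    · rw [C1P_iff c w i h1]; omega
                  · rw [C2P_iff]; omega
                  · rw [C3P_iff]; omega
                  · rintro ⟨hch, h4⟩
                    rw [C4P_slice_iff] at h4
                    have hieq : i = c.length - 1 - cpl c.reverse w.reverse - 1 := by omega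
                    apply hrev
                    constructor
                    · omega
                    · have e1 : ((i : Nat) : Int) =
                          ((c.length - 1 - cpl c.reverse w.reverse : Nat) : Int) - 1 := by omega
                      have e2 : ((i : Nat) : Int) + 1 =
                          ((c.length - 1 - cpl c.reverse w.reverse : Nat) : Int) := by omega
                      rw [e2, e1] at hch
                      exact hch
              by_cases hfi : c.length - 1 - cpl c.reverse w.reverse ≤ min c.length w.length - 2
              · have hnm : ¬ MisP c w (c.length - 1 - cpl c.reverse w.reverse) := by
                  rw [MisP_iff]
                  exact take_ne_of_cpl_lt c w _ (by omega) (by omega) (by omega)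
                have hc1 : ¬ C1P c w (c.length - 1 - cpl c.reverse w.reverse) := by
                  rcases Nat.eq_zero_or_pos (c.length - 1 - cpl c.reverse w.reverse) with h0 | h1
                  · rw [h0, C1P_zero_iff]; omega
                  · rw [C1P_iff c w _ h1]; omega
                have hc2 : ¬ C2P c w (c.length - 1 - cpl c.reverse w.reverse) := by
                  rw [C2P_iff]; omega
                have hc3 : C3P c w (c.length - 1 - cpl c.reverse w.reverse) := by
                  rw [C3P_iff]; omega
                rw [loopA_range'_fire c w (min c.length w.length - 1) 0
                    (c.length - 1 - cpl c.reverse w.reverse) st (by omega) (by omega)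
                    (fun i _ v => hskip i (by omega) v) ⟨hnm, Or.inr (Or.inr (Or.inl hc3))⟩]
                unfold MisP at hnm
                unfold C1P at hc1
                unfold C2P at hc2
                unfold C3P at hc3
                simp only [loopA]
                rw [if_pos hnm, if_neg hc1, if_neg hc2, if_pos hc3]
                simp only [scanB]
                rw [if_neg (by omega : ¬ min c.length w.length < 2),
                  if_neg (by omega : ¬ ((w.length : Int) = (c.length : Int) - 1)),
                  if_neg (by omega : ¬ ((w.length : Int) = (c.length : Int) + 1)),
                  if_pos (⟨heqc, by omega⟩ :
                    w.length = c.length ∧ cpl c w + cpl c.reverse w.reverse < c.length),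
                  if_neg hrev, if_pos hfi]
              · rw [loopA_range'_skip c w (min c.length w.length - 1) 0 st
                    (fun i _ v => hskip i (by omega) (by omega))]
                simp only [scanB]
                rw [if_neg (by omega : ¬ min c.length w.length < 2),
                  if_neg (by omega : ¬ ((w.length : Int) = (c.length : Int) - 1)),
                  if_neg (by omega : ¬ ((w.length : Int) = (c.length : Int) + 1)),
                  if_pos (⟨heqc, by omega⟩ :
                    w.length = c.length ∧ cpl c w + cpl c.reverse w.reverse < c.length),
                  if_neg hrev, if_neg hfi]
        · -- lengths differ by at least 2: nothing can ever fire
          have hgap : c.length + 2 ≤ w.length ∨ w.length + 2 ≤ c.length := by omega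
          rw [loopA_range'_skip c w (min c.length w.length - 1) 0 st ?_]
          · simp only [scanB]
            rw [if_neg (by omega : ¬ min c.length w.length < 2),
              if_neg (by omega : ¬ ((w.length : Int) = (c.length : Int) - 1)),
              if_neg (by omega : ¬ ((w.length : Int) = (c.length : Int) + 1)),
              if_neg (by omega : ¬ (w.length = c.length ∧
                cpl c w + cpl c.reverse w.reverse < c.length))]
          · intro i hi1 hi2
            right
            refine ⟨?_, ?_, ?_, ?_⟩
            · rcases Nat.eq_zero_or_pos i with h0 | h1
              · subst h0; rw [C1P_zero_iff]; omega
              · rw [C1P_iff c w i h1]; omega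
            · rw [C2P_iff]; omega
            · rw [C3P_iff]; omega
            · rintro ⟨-, h4⟩; rw [C4P_slice_iff] at h4; omega

-- ===== VERDICT (by name: the statement is the Claim_ definition above) =====
theorem editType_spec : Claim_equal_editType := by
  intro candidate word _
  unfold Spec_editType editType editType_alt
  dsimp only
  rw [loop_eq_scan_proof, loop_eq_scan_proof]
  have h : (decide (word.toList.reverse = candidate.toList.reverse)) = (decide (candidate.toList = word.toList)) := by
    simp [List.reverse_inj, eq_comm]
  rw [h]
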